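-- pv_equiv track=rewrite | github.com/kaush4l/LocalAgents | core/responses.py | _parse_bracket_list
-- ===== SOURCE A (Python) =====
-- def _parse_bracket_list(value: str) -> list[str] | None:
--     """Parse a bracket-enclosed list: [item1, item2, item3].
--
--     Handles nested brackets/parens for tool calls like:
--     [tool_a({"x": 1}), tool_b({"y": 2})]
--     """
--     value = value.strip()
--     if not (value.startswith('[') and value.endswith(']')):
--         return None
--
--     inner = value[1:-1].strip()
--     if not inner:
--         return []
--
--     # Split by comma, tracking bracket depth for nested content
--     items = []
--     current = []
--     depth = 0
--
--     for char in inner: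
--         if char in '({[':
--             depth += 1
--             current.append(char)
--         elif char in ')}]':
--             depth -= 1
--             current.append(char)
--         elif char == ',' and depth == 0:
--             items.append(''.join(current).strip())
--             current = []
--         else:
--             current.append(char)
--
--     if current:
--         items.append(''.join(current).strip())
--
--     return items
-- ===== SOURCE B (Python) =====
-- def _parse_bracket_list(value: str) -> list[str] | None:
--     value = value.strip()
--     if not (value.startswith('[') and value.endswith(']')):
--         return None
--
--     inner = value[1:-1].strip()
--     if not inner:
--         return []
--
--     # First pass: record indices of top-level commas (bracket depth 0).
--     cuts = []
--     depth = 0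
--     for i, ch in enumerate(inner):
--         if ch in '({[':
--             depth += 1
--         elif ch in ')}]':
--             depth -= 1
--         elif ch == ',' and depth == 0:
--             cuts.append(i)
--
--     # Second pass: slice inner at those boundaries.
--     items = []
--     start = 0
--     for c in cuts:
--         items.append(inner[start:c].strip())
--         start = c + 1
--     if start < len(inner):
--         items.append(inner[start:].strip())
--     return items
-- ===== Notes on version B (the rewrite author's own statement) =====
-- stated objective: alternative
-- what changed: Replaces A's single loop that accumulates a character buffer with two passes: first collect the indices of depth-0 commas, then slice the inner string at those boundaries (trailing segment appended only when its start index is before the end of the string).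
import Mathlib
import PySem

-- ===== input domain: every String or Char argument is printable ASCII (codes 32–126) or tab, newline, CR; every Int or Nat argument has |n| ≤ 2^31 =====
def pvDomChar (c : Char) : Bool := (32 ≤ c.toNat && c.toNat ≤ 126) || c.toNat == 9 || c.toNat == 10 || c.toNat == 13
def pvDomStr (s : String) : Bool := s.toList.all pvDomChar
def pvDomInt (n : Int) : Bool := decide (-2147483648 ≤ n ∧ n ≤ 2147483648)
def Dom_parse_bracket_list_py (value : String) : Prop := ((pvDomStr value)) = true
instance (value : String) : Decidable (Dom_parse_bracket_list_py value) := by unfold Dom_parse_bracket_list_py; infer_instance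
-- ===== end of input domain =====

-- B replaces A's single character-buffer loop by two passes (collect top-level comma
-- indices, then slice at those boundaries); objective: alternative decomposition, not speed.

-- char in '({[' / char in ')}]'  (shared character tests, exact on these literals)
def pbOpen (c : Char) : Bool := c = '(' || c = '{' || c = '['
def pbClose (c : Char) : Bool := c = ')' || c = '}' || c = ']'

-- ===== PORT A =====
-- the 'for char in inner' loop with state (items, current, depth); ''.join(current) = String.ofList
def pbLoopA : List Char → List String → List Char → Int → List String
  | [], items, cur, _ =>
      if cur.isEmpty then items else items ++ [PySem.Str.strip (String.ofList cur)]
  | c :: cs, items, cur, d =>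
      if pbOpen c then pbLoopA cs items (cur ++ [c]) (d + 1)
      else if pbClose c then pbLoopA cs items (cur ++ [c]) (d - 1)
      else if c = ',' ∧ d = 0 then pbLoopA cs (items ++ [PySem.Str.strip (String.ofList cur)]) [] d
      else pbLoopA cs items (cur ++ [c]) d

def parse_bracket_list_py (value : String) : Option (List String) :=
  let value := PySem.Str.strip value
  if !(PySem.Str.startswith value "[" && PySem.Str.endswith value "]") then none
  else
    let inner := PySem.Str.strip (PySem.Str.slice value (some 1) (some (-1)))
    if inner = "" then some []
    else some (pbLoopA inner.toList [] [] 0)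

-- ===== PORT B =====
-- first pass: 'for i, ch in enumerate(inner)' collecting indices of depth-0 commas
def pbCuts : List Char → Nat → Int → List Nat
  | [], _, _ => []
  | c :: cs, i, d =>
      if pbOpen c then pbCuts cs (i + 1) (d + 1)
      else if pbClose c then pbCuts cs (i + 1) (d - 1)
      else if c = ',' ∧ d = 0 then i :: pbCuts cs (i + 1) d
      else pbCuts cs (i + 1) d

-- second pass: 'for c in cuts' slicing, then the trailing segment if start < len(inner)
def pbSlices (inner : String) : Nat → List Nat → List String
  | start, [] =>
      if (start : Int) < PySem.Str.len inner
      then [PySem.Str.strip (PySem.Str.slice inner (some (start : Int)) none)] else []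
  | start, c :: rest =>
      PySem.Str.strip (PySem.Str.slice inner (some (start : Int)) (some (c : Int))) :: pbSlices inner (c + 1) rest

def parse_bracket_list_py_alt (value : String) : Option (List String) :=
  let value := PySem.Str.strip value
  if !(PySem.Str.startswith value "[" && PySem.Str.endswith value "]") then none
  else
    let inner := PySem.Str.strip (PySem.Str.slice value (some 1) (some (-1)))
    if inner = "" then some []
    else some (pbSlices inner 0 (pbCuts inner.toList 0 0))

-- ===== PRECONDITION & SPEC =====
def Spec_parse_bracket_list_py (value : String) (out : Option (List String)) : Prop := out = parse_bracket_list_py_alt value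
instance (value : String) (out : Option (List String)) : Decidable (Spec_parse_bracket_list_py value out) := by unfold Spec_parse_bracket_list_py; infer_instance

-- ===== CLAIM (what is proved, stated in full; the proofs are below) =====
def Claim_equal_parse_bracket_list_py : Prop := ∀ (value : String), Dom_parse_bracket_list_py value → Spec_parse_bracket_list_py value (parse_bracket_list_py value)

-- ===== LEMMAS AND PROOFS =====

-- the list of (unstripped) top-level segments of cs, starting at depth d with buffer cur
def pbSegs : List Char → Int → List Char → List (List Char)
  | [], _, cur => if cur.isEmpty then [] else [cur]
  | c :: cs, d, cur =>
      if pbOpen c then pbSegs cs (d + 1) (cur ++ [c])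
      else if pbClose c then pbSegs cs (d - 1) (cur ++ [c])
      else if c = ',' ∧ d = 0 then cur :: pbSegs cs d []
      else pbSegs cs d (cur ++ [c])

theorem pbLoopA_eq_segs (cs : List Char) (items : List String) (cur : List Char) (d : Int) :
    pbLoopA cs items cur d =
      items ++ (pbSegs cs d cur).map (fun l => PySem.Str.strip (String.ofList l)) := by
  induction cs generalizing items cur d with
  | nil => simp [pbLoopA, pbSegs]; split_ifs <;> simp
  | cons c cs ih =>
      simp only [pbLoopA, pbSegs]
      split_ifs <;> simp [ih]

theorem pbSlices_eq_segs (inner : String) :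
    ∀ (cs : List Char) (st j : Nat) (d : Int),
      inner.toList.drop j = cs → st ≤ j →
      pbSlices inner st (pbCuts cs j d) =
        (pbSegs cs d ((inner.toList.drop st).take (j - st))).map
          (fun l => PySem.Str.strip (String.ofList l)) := by
  intro cs
  induction cs with
  | nil =>
      intro st j d hdrop hle
      have hL : inner.toList.length = inner.length := by simp
      have hlen : inner.toList.length ≤ j := by
        by_contra h
        have := List.drop_eq_nil_iff.mp hdrop
        omega
      have hcur : (inner.toList.drop st).take (j - st) = inner.toList.drop st := by
        apply List.take_of_length_le
        simp only [List.length_drop]; omega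
      simp only [pbCuts, pbSlices, pbSegs, hcur]
      by_cases hst : st < inner.toList.length
      · rw [if_pos, if_neg]
        · simp [PySem.Str.slice, PySem.Chars.slice_eq_listSlice,
            PySem.List.slice_from_natCast]
        · simp [List.isEmpty_iff, List.drop_eq_nil_iff]; omega
        · simp only [PySem.Str.len]; omega
      · rw [if_neg, if_pos]
        · simp
        · simp [List.isEmpty_iff, List.drop_eq_nil_iff]; omega
        · simp only [PySem.Str.len]; omega
  | cons c cs ih =>
      intro st j d hdrop hle
      have hj : inner.toList[j]? = some c := by
        have : (inner.toList.drop j)[0]? = some c := by rw [hdrop]; rfl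
        simpa using this
      have hdrop' : inner.toList.drop (j + 1) = cs := by
        rw [← List.drop_drop, hdrop]; rfl
      have hcur : (inner.toList.drop st).take (j + 1 - st) =
          (inner.toList.drop st).take (j - st) ++ [c] := by
        have h1 : j + 1 - st = (j - st) + 1 := by omega
        rw [h1, List.take_add_one]
        have : (inner.toList.drop st)[j - st]? = some c := by
          rw [List.getElem?_drop]
          have : st + (j - st) = j := by omega
          rw [this, hj]
        simp [this]
      simp only [pbCuts, pbSegs]
      split_ifs with h1 h2 h3
      · rw [ih _ (j + 1) _ hdrop' (by omega), hcur]
      · rw [ih _ (j + 1) _ hdrop' (by omega), hcur]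
      · have hslice : PySem.Str.slice inner (some (st : Int)) (some (j : Int)) =
            String.ofList ((inner.toList.drop st).take (j - st)) := by
          simp [PySem.Str.slice, PySem.Chars.slice_eq_listSlice,
            PySem.List.slice_natCast]
        simp only [pbSlices, hslice, List.map_cons]
        rw [ih (j + 1) (j + 1) _ hdrop' (le_refl _)]
        simp
      · rw [ih _ (j + 1) _ hdrop' (by omega), hcur]

theorem parse_bracket_list_py_spec : Claim_equal_parse_bracket_list_py := by
  intro value _
  unfold Spec_parse_bracket_list_py parse_bracket_list_py parse_bracket_list_py_alt
  simp only
  split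
  · rfl
  · split
    · rfl
    · refine congrArg some ?_
      rw [pbLoopA_eq_segs, pbSlices_eq_segs _ _ 0 0 0 (by simp) (le_refl _)]
      simp
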